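-- pv_equiv track=rewrite | github.com/henryyun19/Python-projects | hyun20_277_final.py | prolific_author
-- ===== SOURCE A (Python) =====
-- def prolific_author(books):
--     elm = []
--     dup = []
--     final = []
--     for i in books.values():
--         if i in elm:
--             dup.append(i)
--         else:
--             elm.append(i)
--     for j in range(len(dup)):
--         for i in books.keys():
--             if books.get(i) == dup[j]:
--                 final.append(i)
--         return final
-- ===== SOURCE B (Python) =====
-- def prolific_author(books):
--     groups = {}
--     target = None
--     for k, v in books.items():
--         if v in groups:
--             if target is None:
--                 target = v
--             groups[v].append(k)
--         else:
--             groups[v] = [k]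
--     if target is None:
--         return None
--     return groups[target]
-- ===== Notes on version B (the rewrite author's own statement) =====
-- stated objective: alternative
-- what changed: A detects duplicate values then rescans all keys for the first duplicated value; B builds one value->keys index in a single pass, recording the first value seen twice, and finishes with a single lookup.
import Mathlib
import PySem

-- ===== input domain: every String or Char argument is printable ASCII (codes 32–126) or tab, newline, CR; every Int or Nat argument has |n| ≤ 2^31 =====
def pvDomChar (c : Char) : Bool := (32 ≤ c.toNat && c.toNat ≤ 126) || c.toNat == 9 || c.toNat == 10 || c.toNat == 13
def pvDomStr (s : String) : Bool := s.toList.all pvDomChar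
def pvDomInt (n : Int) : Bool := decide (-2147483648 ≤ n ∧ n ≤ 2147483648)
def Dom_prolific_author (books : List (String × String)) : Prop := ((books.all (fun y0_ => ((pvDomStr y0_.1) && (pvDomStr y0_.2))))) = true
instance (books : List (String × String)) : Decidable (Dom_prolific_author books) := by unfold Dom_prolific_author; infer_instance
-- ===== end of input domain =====

-- B replaces A's detect-duplicates-then-rescan-keys with a single value→keys index pass and one lookup (alternative decomposition).

-- ===== PORT A =====
def prolific_author (books : List (String × String)) : Option (List String) :=
  let d := PySem.Dict.ofList books
  -- for i in books.values(): if i in elm: dup.append(i) else: elm.append(i)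
  let st := d.values.foldl
      (fun (st : List String × List String) i =>
        if i ∈ st.1 then (st.1, st.2 ++ [i]) else (st.1 ++ [i], st.2)) ([], [])
  -- for j in range(len(dup)): for i in books.keys(): if books.get(i) == dup[j]: final.append(i); return final
  match st.2 with
  | [] => none
  | t :: _ =>
      some (d.keys.foldl (fun final i => if d.get? i == some t then final ++ [i] else final) [])

-- ===== PORT B =====
def prolific_author_alt (books : List (String × String)) : Option (List String) :=
  let d := PySem.Dict.ofList books
  let st := d.items.foldl
      (fun (st : PySem.Dict String (List String) × Option String) (p : String × String) =>
        if st.1.contains p.2 then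
          ((st.1.modify p.2 [] (· ++ [p.1])), if st.2.isNone then some p.2 else st.2)
        else
          (st.1.insert p.2 [p.1], st.2)) (PySem.Dict.empty, none)
  match st.2 with
  | none => none
  | some t => some (st.1.getD t [])

-- ===== PRECONDITION & SPEC =====
def Spec_prolific_author (books : List (String × String)) (out : Option (List String)) : Prop := out = prolific_author_alt books
instance (books : List (String × String)) (out : Option (List String)) : Decidable (Spec_prolific_author books out) := by unfold Spec_prolific_author; infer_instance

-- ===== CLAIM (what is proved, stated in full; the proofs are below) =====
def Claim_equal_prolific_author : Prop := ∀ (books : List (String × String)), Dom_prolific_author books → Spec_prolific_author books (prolific_author books)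

-- ===== LEMMAS AND PROOFS =====

-- The two loop bodies, named for the induction.
def pvStepA (st : List String × List String) (p : String × String) : List String × List String :=
  if p.2 ∈ st.1 then (st.1, st.2 ++ [p.2]) else (st.1 ++ [p.2], st.2)

def pvStepB (st : PySem.Dict String (List String) × Option String) (p : String × String) :
    PySem.Dict String (List String) × Option String :=
  if st.1.contains p.2 then
    ((st.1.modify p.2 [] (· ++ [p.1])), if st.2.isNone then some p.2 else st.2)
  else
    (st.1.insert p.2 [p.1], st.2)

-- Main invariant: running both loops over the same item list from related states keeps them related,
-- and B's index accumulates exactly the keys grouped by value.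
lemma pv_loop_inv (l : List (String × String)) (elm dup : List String)
    (g : PySem.Dict String (List String)) (t : Option String)
    (hc : ∀ v, g.contains v = decide (v ∈ elm))
    (ht : t = dup.head?) :
    (∀ v, (l.foldl pvStepB (g, t)).1.contains v = decide (v ∈ (l.foldl pvStepA (elm, dup)).1)) ∧
    (l.foldl pvStepB (g, t)).2 = (l.foldl pvStepA (elm, dup)).2.head? ∧
    (∀ v, (l.foldl pvStepB (g, t)).1.getD v [] =
      g.getD v [] ++ (l.filter (fun p => p.2 == v)).map (·.1)) := by
  induction l generalizing elm dup g t with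
  | nil => simpa using ⟨hc, ht⟩
  | cons p l ih =>
    simp only [List.foldl_cons]
    by_cases hmem : p.2 ∈ elm
    · have hcon : g.contains p.2 = true := by rw [hc]; simpa using hmem
      have hA : pvStepA (elm, dup) p = (elm, dup ++ [p.2]) := by
        simp [pvStepA, hmem]
      have hB : pvStepB (g, t) p =
          ((g.modify p.2 [] (· ++ [p.1])), if t.isNone then some p.2 else t) := by
        simp [pvStepB, hcon]
      simp only [hA, hB]
      have hc' : ∀ v, (g.modify p.2 [] (· ++ [p.1])).contains v = decide (v ∈ elm) := by
        intro v
        rw [PySem.Dict.contains_modify, hc]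
        by_cases hv : v = p.2 <;> simp [hv, hmem]
      have ht' : (if t.isNone then some p.2 else t) = (dup ++ [p.2]).head? := by
        cases dup with
        | nil => simp [ht]
        | cons a rest => simp [ht]
      obtain ⟨h1, h2, h3⟩ := ih elm (dup ++ [p.2]) _ _ hc' ht'
      refine ⟨h1, h2, ?_⟩
      intro v
      rw [h3 v, PySem.Dict.getD_modify]
      by_cases hv : v = p.2
      · subst hv; simp
      · simp [hv, (by simpa [eq_comm] using hv : ¬ p.2 = v)]
    · have hcon : g.contains p.2 = false := by rw [hc]; simpa using hmem
      have hA : pvStepA (elm, dup) p = (elm ++ [p.2], dup) := by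
        simp [pvStepA, hmem]
      have hB : pvStepB (g, t) p = (g.insert p.2 [p.1], t) := by
        simp [pvStepB, hcon]
      simp only [hA, hB]
      have hc' : ∀ v, (g.insert p.2 [p.1]).contains v = decide (v ∈ elm ++ [p.2]) := by
        intro v
        rw [PySem.Dict.contains_insert, hc]
        by_cases hv : v = p.2 <;> simp [hv]
      obtain ⟨h1, h2, h3⟩ := ih (elm ++ [p.2]) dup _ _ hc' ht
      refine ⟨h1, h2, ?_⟩
      intro v
      rw [h3 v, PySem.Dict.getD_insert]
      by_cases hv : v = p.2
      · subst hv
        simp [PySem.Dict.getD_of_not_contains _ _ hcon]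
      · simp [hv, (by simpa [eq_comm] using hv : ¬ p.2 = v)]

-- ===== VERDICT (by name: the statement is the Claim_ definition above) =====
theorem prolific_author_spec : Claim_equal_prolific_author := by
  intro books _
  unfold Spec_prolific_author prolific_author prolific_author_alt
  set d := PySem.Dict.ofList books with hd
  have hnodup : d.keys.Nodup := PySem.Dict.nodup_keys_ofList books
  have hvals : d.values.foldl
      (fun (st : List String × List String) i =>
        if i ∈ st.1 then (st.1, st.2 ++ [i]) else (st.1 ++ [i], st.2)) ([], []) =
      d.items.foldl pvStepA ([], []) := by
    show (d.items.map (·.2)).foldl _ _ = _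
    rw [List.foldl_map]
    rfl
  have hstepB : d.items.foldl
      (fun (st : PySem.Dict String (List String) × Option String) (p : String × String) =>
        if st.1.contains p.2 then
          ((st.1.modify p.2 [] (· ++ [p.1])), if st.2.isNone then some p.2 else st.2)
        else
          (st.1.insert p.2 [p.1], st.2)) (PySem.Dict.empty, none) =
      d.items.foldl pvStepB (PySem.Dict.empty, none) := rfl
  obtain ⟨h1, h2, h3⟩ := pv_loop_inv d.items [] [] PySem.Dict.empty none
    (by intro v; simp [PySem.Dict.contains_empty]) rfl
  simp only [hvals, hstepB]
  rw [h2]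
  cases hdup : (d.items.foldl pvStepA ([], [])).2 with
  | nil => simp
  | cons tv rest =>
    simp only [List.head?_cons]
    congr 1
    rw [h3 tv, PySem.Dict.getD_empty]
    rw [PySem.List.foldl_append_if]
    simp only [List.nil_append]
    rw [List.map_id']
    have hk : d.keys = d.items.map (·.1) := rfl
    rw [hk, List.filter_map]
    congr 1
    apply List.filter_congr
    intro p hp
    obtain ⟨k, v⟩ := p
    have hget := PySem.Dict.get?_of_mem_items d hp hnodup
    simp [Function.comp, hget]
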